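-- pv_equiv track=rewrite | github.com/7829hw/CT-SWcoding | 20221118/CT.9.4/solve.py | hor
-- ===== SOURCE A (Python) =====
-- def hor(n, m):
--     cnt = 0
--     pos = {}
--     for i in m:
--         if i[1] not in pos.keys():
--             pos[i[1]] = 1
--         else:
--             pos[i[1]] += 1
--     for i in list(pos.values()):
--         if i > 1:
--             cnt += 1
--     return cnt
-- ===== SOURCE B (Python) =====
-- def hor(n, m):
--     ks = sorted(i[1] for i in m)
--     cnt = 0
--     j = 0
--     while j < len(ks):
--         r = j + 1
--         while r < len(ks) and ks[r] == ks[j]: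
--             r += 1
--         if r - j > 1:
--             cnt += 1
--         j = r
--     return cnt
-- ===== Notes on version B (the rewrite author's own statement) =====
-- stated objective: alternative
-- what changed: Replaced A's hash-counting structure (build a dict of per-key counts, then scan the values for counts > 1) by a sort-based algorithm: sort the column keys so equal keys become adjacent, then scan the sorted list once counting maximal runs of length > 1; no dictionary or counts are maintained.
import Mathlib
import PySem

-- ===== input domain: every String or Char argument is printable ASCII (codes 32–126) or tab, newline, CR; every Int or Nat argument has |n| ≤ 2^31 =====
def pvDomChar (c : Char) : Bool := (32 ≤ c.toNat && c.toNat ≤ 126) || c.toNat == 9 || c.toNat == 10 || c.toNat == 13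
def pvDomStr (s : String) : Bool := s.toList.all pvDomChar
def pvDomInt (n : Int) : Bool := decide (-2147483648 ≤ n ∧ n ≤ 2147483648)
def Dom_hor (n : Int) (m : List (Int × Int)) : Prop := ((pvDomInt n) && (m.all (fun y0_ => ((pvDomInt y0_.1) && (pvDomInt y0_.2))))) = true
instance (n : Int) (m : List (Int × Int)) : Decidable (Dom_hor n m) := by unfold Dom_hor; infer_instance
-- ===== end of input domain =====

-- B replaces A's dict-of-counts plus value scan by a sort-based algorithm:
-- sort the column keys, then count maximal runs of equal adjacent keys of length > 1 (alternative).

-- ===== PORT A =====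
def hor (_n : Int) (m : List (Int × Int)) : Int :=
  let pos : PySem.Dict Int Int :=
    m.foldl (fun pos i =>
      if pos.contains i.2 = false then pos.insert i.2 1
      else pos.modify i.2 0 (· + 1)) PySem.Dict.empty
  pos.values.foldl (fun cnt i => if i > 1 then cnt + 1 else cnt) 0

-- ===== PORT B =====
-- B's outer while loop consumes one maximal run of equal keys per iteration
-- (the inner while advancing r is the takeWhile/dropWhile split of the suffix).
def horRuns : List Int → Int
  | [] => 0
  | k :: rest =>
      (if rest.takeWhile (fun x => x == k) = [] then 0 else 1)
        + horRuns (rest.dropWhile (fun x => x == k))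
termination_by l => l.length
decreasing_by
  simpa using Nat.lt_succ_of_le (List.length_dropWhile_le _ _)

def hor_alt (_n : Int) (m : List (Int × Int)) : Int :=
  horRuns (PySem.List.sorted (m.map (·.2)) (fun x => x) false)

-- ===== PRECONDITION & SPEC =====
def Spec_hor (n : Int) (m : List (Int × Int)) (out : Int) : Prop := out = hor_alt n m
instance (n : Int) (m : List (Int × Int)) (out : Int) : Decidable (Spec_hor n m out) := by unfold Spec_hor; infer_instance

-- ===== CLAIM (what is proved, stated in full; the proofs are below) =====
def Claim_equal_hor : Prop := ∀ (n : Int) (m : List (Int × Int)), Dom_hor n m → Spec_hor n m (hor n m)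

-- ===== LEMMAS AND PROOFS =====

-- the common specification: number of distinct keys occurring at least twice
def dupSpec (l : List Int) : Nat :=
  (PySem.Set.ofList l).countP (fun k => decide (2 ≤ l.count k))

-- A's dict-building loop: keys are the distinct keys in order, each value is the count.
theorem horA_dict_inv (xs : List Int) :
    (xs.foldl (fun pos k =>
      if pos.contains k = false then pos.insert k 1
      else pos.modify k 0 (· + 1)) (PySem.Dict.empty : PySem.Dict Int Int)).keys
        = PySem.Set.ofList xs ∧
    ∀ k : Int, (xs.foldl (fun pos k =>
      if pos.contains k = false then pos.insert k 1
      else pos.modify k 0 (· + 1)) (PySem.Dict.empty : PySem.Dict Int Int)).getD k 0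
        = (xs.count k : Int) := by
  induction xs using List.reverseRecOn with
  | nil => constructor <;> simp [PySem.Set.ofList, PySem.Dict.keys_empty, PySem.Dict.getD_empty]
  | append_singleton xs x ih =>
    obtain ⟨hk, hv⟩ := ih
    rw [List.foldl_append]
    simp only [List.foldl_cons, List.foldl_nil]
    set D := xs.foldl (fun pos k =>
      if pos.contains k = false then pos.insert k 1
      else pos.modify k 0 (· + 1)) (PySem.Dict.empty : PySem.Dict Int Int) with hD
    have hmemx : D.contains x = true ↔ x ∈ xs := by
      rw [PySem.Dict.contains_iff_mem_keys, hk, PySem.Set.mem_ofList]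
    by_cases hx : x ∈ xs
    · have hc : D.contains x = true := hmemx.mpr hx
      rw [if_neg (by simp [hc])]
      constructor
      · rw [PySem.Dict.keys_modify, PySem.Dict.keys_insert_of_contains _ _ hc, hk,
          PySem.Set.ofList_append_singleton, PySem.Set.add_of_mem (PySem.Set.mem_ofList xs x |>.mpr hx)]
      · intro k
        rw [PySem.Dict.getD_modify, List.count_append]
        by_cases hkx : k = x
        · subst hkx; simp [hv k]
        · simp only [if_neg hkx, hv k, List.count_singleton]
          have : ¬ (x == k) = true := by simp [Ne.symm hkx]
          simp [this]
    · have hc : D.contains x = false := by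
        cases h : D.contains x with
        | false => rfl
        | true => exact absurd (hmemx.mp h) hx
      rw [if_pos hc]
      constructor
      · rw [PySem.Dict.keys_insert_of_not_contains _ _ hc, hk,
          PySem.Set.ofList_append_singleton,
          PySem.Set.add_of_not_mem (fun hmem => hx ((PySem.Set.mem_ofList xs x).mp hmem))]
      · intro k
        rw [PySem.Dict.getD_insert, List.count_append]
        by_cases hkx : k = x
        · subst hkx
          have h0 : xs.count k = 0 := List.count_eq_zero.mpr hx
          simp [h0]
        · simp only [if_neg hkx, hv k, List.count_singleton]
          have : ¬ (x == k) = true := by simp [Ne.symm hkx]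
          simp [this]

-- the counting loop over the values list is countP
theorem foldl_count_gt_one (l : List Int) (c : Int) :
    l.foldl (fun cnt i => if i > 1 then cnt + 1 else cnt) c
      = c + (l.countP (fun i => decide (1 < i)) : Int) := by
  induction l generalizing c with
  | nil => simp
  | cons a l ih =>
    simp only [List.foldl, List.countP_cons]
    by_cases h : 1 < a
    · simp [h, ih]; ring
    · simp [h, ih]

-- A computes dupSpec of its key list
theorem horA_eq_dupSpec (n : Int) (m : List (Int × Int)) :
    hor n m = (dupSpec (m.map (·.2)) : Int) := by
  unfold hor dupSpec
  have hAf : (m.foldl (fun pos i =>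
      if pos.contains i.2 = false then pos.insert i.2 1
      else pos.modify i.2 0 (· + 1)) (PySem.Dict.empty : PySem.Dict Int Int))
      = ((m.map (·.2)).foldl (fun pos k =>
      if pos.contains k = false then pos.insert k 1
      else pos.modify k 0 (· + 1)) (PySem.Dict.empty : PySem.Dict Int Int)) := by
    rw [List.foldl_map]
  set ks := m.map (·.2) with hks
  obtain ⟨hk, hv⟩ := horA_dict_inv ks
  simp only [hAf]
  set D := ks.foldl (fun pos k =>
      if pos.contains k = false then pos.insert k 1
      else pos.modify k 0 (· + 1)) (PySem.Dict.empty : PySem.Dict Int Int) with hD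
  have hndk : D.keys.Nodup := by rw [hk]; exact PySem.Set.nodup_ofList ks
  have hvals : D.values = D.keys.map (fun k => D.getD k 0) :=
    PySem.Dict.values_eq_map_keys D hndk 0
  rw [hvals, foldl_count_gt_one, List.countP_map, hk]
  have : (PySem.Set.ofList ks).countP ((fun i => decide (1 < i)) ∘ fun k => D.getD k 0)
      = (PySem.Set.ofList ks).countP (fun k => decide (2 ≤ ks.count k)) := by
    apply List.countP_congr
    intro k _
    simp only [Function.comp, hv k]
    constructor <;> intro h <;> simp_all <;> omega
  rw [this]
  simp

-- dupSpec only depends on the multiset of keys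
theorem dupSpec_perm {l₁ l₂ : List Int} (h : l₁.Perm l₂) : dupSpec l₁ = dupSpec l₂ := by
  unfold dupSpec
  have hcnt : ∀ k : Int, l₁.count k = l₂.count k := fun k => h.count_eq k
  have hperm : (PySem.Set.ofList l₁).Perm (PySem.Set.ofList l₂) := by
    rw [List.perm_ext_iff_of_nodup (PySem.Set.nodup_ofList l₁) (PySem.Set.nodup_ofList l₂)]
    intro k
    rw [PySem.Set.mem_ofList, PySem.Set.mem_ofList]
    exact h.mem_iff
  calc (PySem.Set.ofList l₁).countP (fun k => decide (2 ≤ l₁.count k))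
      = (PySem.Set.ofList l₁).countP (fun k => decide (2 ≤ l₂.count k)) := by
        apply List.countP_congr; intro k _; simp [hcnt k]
    _ = (PySem.Set.ofList l₂).countP (fun k => decide (2 ≤ l₂.count k)) :=
        hperm.countP_eq _

-- on a sorted list, the run scanner computes dupSpec
theorem horRuns_eq_dupSpec (s : List Int) (hs : s.Pairwise (· ≤ ·)) :
    horRuns s = (dupSpec s : Int) := by
  induction hn : s.length using Nat.strong_induction_on generalizing s with
  | _ n ih =>
    match s, hs with
    | [], _ => simp [horRuns, dupSpec, PySem.Set.ofList]
    | k :: rest, hs =>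
      have hrest : rest.Pairwise (· ≤ ·) := hs.of_cons
      have hge : ∀ x ∈ rest, k ≤ x := fun x hx => List.rel_of_pairwise_cons hs hx
      set t := rest.takeWhile (fun x => x == k) with ht
      set d := rest.dropWhile (fun x => x == k) with hd
      have hsplit : rest = t ++ d := (List.takeWhile_append_dropWhile).symm
      have htk : ∀ x ∈ t, x = k := by
        intro x hx
        have := List.mem_takeWhile_imp hx
        simpa using this
      have hdp : d.Pairwise (· ≤ ·) := hrest.sublist (List.dropWhile_sublist _)
      have hknd : k ∉ d := by
        intro hkd
        cases hdm : d with
        | nil => rw [hdm] at hkd; simp at hkd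
        | cons h₀ d' =>
          have hh' : h₀ ≠ k := by
            have h1 := List.head?_dropWhile_not (fun x => x == k) rest
            rw [← hd, hdm] at h1
            simpa using h1
          have hmem : h₀ ∈ rest := by rw [hsplit, hdm]; simp
          have hge' : k ≤ h₀ := hge h₀ hmem
          rw [hdm] at hkd hdp
          rcases List.mem_cons.mp hkd with h | h
          · exact hh' h.symm
          · have hle : h₀ ≤ k := List.rel_of_pairwise_cons hdp h
            have : k < h₀ := lt_of_le_of_ne hge' (Ne.symm hh')
            omega
      have hcount_k : (k :: rest).count k = 1 + t.length := by
        rw [List.count_cons_self, hsplit, List.count_append]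
        have hct : t.count k = t.length := List.count_eq_length.mpr (by
          intro x hx; simpa using (htk x hx).symm)
        have hcd : d.count k = 0 := List.count_eq_zero.mpr hknd
        omega
      have hcount_ne : ∀ x : Int, x ≠ k → (k :: rest).count x = d.count x := by
        intro x hxk
        have ht0 : t.count x = 0 := List.count_eq_zero.mpr (fun hx => hxk (htk x hx))
        rw [hsplit]
        simp [List.count_append, ht0, Ne.symm hxk]
      -- distinct elements: Set.ofList (k :: rest) ~ k :: Set.ofList d
      have hset : (PySem.Set.ofList (k :: rest)).Perm (k :: PySem.Set.ofList d) := by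
        rw [List.perm_ext_iff_of_nodup (PySem.Set.nodup_ofList _)
          ((PySem.Set.nodup_ofList d).cons (by rw [PySem.Set.mem_ofList]; exact hknd))]
        intro x
        rw [PySem.Set.mem_ofList, List.mem_cons, List.mem_cons, PySem.Set.mem_ofList,
          hsplit, List.mem_append]
        constructor
        · rintro (h | h | h)
          · exact Or.inl h
          · exact Or.inl (htk x h)
          · exact Or.inr h
        · rintro (h | h)
          · exact Or.inl h
          · exact Or.inr (Or.inr h)
      have hdlen : d.length < (k :: rest).length := by
        simp only [List.length_cons]
        exact Nat.lt_succ_of_le (hsplit ▸ by simp)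
      have hih := ih d.length (hn ▸ hdlen) d hdp rfl
      have hunfold : horRuns (k :: rest) = (if t = [] then (0:Int) else 1) + horRuns d := by
        rw [horRuns, ← ht, ← hd]
      rw [hunfold, hih]
      unfold dupSpec
      rw [hset.countP_eq]
      rw [List.countP_cons]
      have hdcong : (PySem.Set.ofList d).countP (fun x => decide (2 ≤ (k :: rest).count x))
          = (PySem.Set.ofList d).countP (fun x => decide (2 ≤ d.count x)) := by
        apply List.countP_congr
        intro x hx
        have hxk : x ≠ k := fun h => hknd (h ▸ (PySem.Set.mem_ofList d x).mp hx)
        simp [hcount_ne x hxk]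
      rw [hdcong]
      by_cases hte : t = []
      · have hf : (decide (2 ≤ (k :: rest).count k)) = false := by
          simp [hcount_k, hte]
        rw [if_pos hte, hf]
        simp
      · have hlen : 1 ≤ t.length := List.length_pos_iff.mpr hte
        have htr : (decide (2 ≤ (k :: rest).count k)) = true := by
          rw [decide_eq_true_eq, hcount_k]; omega
        rw [if_neg hte, htr]
        simp
        ring

theorem hor_eq_hor_alt (n : Int) (m : List (Int × Int)) : hor n m = hor_alt n m := by
  rw [horA_eq_dupSpec, hor_alt]
  set ks := m.map (·.2) with hks
  have hp : (PySem.List.sorted ks (fun x => x) false).Pairwise (· ≤ ·) := by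
    have := PySem.List.sorted_pairwise ks (fun x => x)
    simpa using this
  rw [horRuns_eq_dupSpec _ hp,
    dupSpec_perm (PySem.List.sorted_perm ks (fun x => x) false)]

-- ===== VERDICT (by name: the statement is the Claim_ definition above) =====
theorem hor_spec : Claim_equal_hor := by
  intro n m _
  unfold Spec_hor
  exact hor_eq_hor_alt n m
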